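-- pv_equiv track=rewrite | github.com/PeterLarochkin/discrete_structures | HM2/draft.py | requirement2__
-- ===== SOURCE A (Python) =====
-- def requirement2__(N, n):
--     finalClause = []
--     for i in range(n, n + N):
--         for k in range(0, 2):
--             for num in range(2**(n+N)):
--                 binNum =  "{}".format(bin(num))[2:]
--                 binNum = (("0"*((n+N) - len(binNum)))+binNum)
--                 if binNum.count("1") != 1:
--                     localClause = []
--                     for j, jtem in enumerate(binNum):
--                         sign = "" if jtem == "0" else "-"
--                         localClause.append(f"{sign}c_{i}_{k}_{j}_")
--                     finalClause.append("V".join(localClause))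
--     return "Λ".join(finalClause)
-- ===== SOURCE B (Python) =====
-- def requirement2__(N, n):
--     if N <= 0:
--         return ""
--     w = n + N
--     width = w if w > 0 else 1  # bin() prints at least one digit
--
--     # Build all bit patterns of the given width in ascending (lexicographic)
--     # order by staged doubling, carrying the running count of ones; no numeric
--     # enumeration, no bin()/padding/scanning.
--     patterns = [([], 0)]
--     for _ in range(width):
--         patterns = [([b] + s, ones + b) for b in (0, 1) for (s, ones) in patterns]
--
--     kept = [s for s, ones in patterns if ones != 1]
--     out = []
--     for i in range(n, n + N):
--         for k in (0, 1):
--             for s in kept: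
--                 out.append("V".join(
--                     f"{'-' if b else ''}c_{i}_{k}_{j}_" for j, b in enumerate(s)))
--     return "Λ".join(out)
-- ===== Notes on version B (the rewrite author's own statement) =====
-- stated objective: alternative
-- what changed: B replaces A's numeric enumeration (loop over range(2**(n+N)) with bin(), zero-padding and substring counting, repeated for every (i,k)) by a recursive generator that builds all bit patterns of the width as lists by structural recursion on the width, carrying the running ones-count; the patterns are filtered once and a plain formatting pass splices in (i,k).
import Mathlib
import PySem

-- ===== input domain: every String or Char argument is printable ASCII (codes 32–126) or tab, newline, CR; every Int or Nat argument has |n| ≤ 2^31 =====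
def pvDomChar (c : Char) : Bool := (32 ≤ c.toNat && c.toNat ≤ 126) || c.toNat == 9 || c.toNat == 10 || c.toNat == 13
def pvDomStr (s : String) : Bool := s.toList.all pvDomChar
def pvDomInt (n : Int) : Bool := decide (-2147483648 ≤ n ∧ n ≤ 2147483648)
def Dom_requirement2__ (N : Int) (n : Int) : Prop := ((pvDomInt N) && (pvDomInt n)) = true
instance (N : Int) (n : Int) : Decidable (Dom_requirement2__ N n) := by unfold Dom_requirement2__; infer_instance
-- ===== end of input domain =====

-- B generates the bit patterns by structural recursion on the width (carrying the
-- running ones-count) instead of A's numeric enumeration with bin()/padding/counting,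
-- filters them once, and splices "<i>_<k>" into each pattern in a formatting pass.

-- ===== PORT A =====
def requirement2__ (N : Int) (n : Int) : String :=
  let finalClause : List String :=
    (PySem.List.pyRange n (n + N)).foldl (fun fc i =>
      (PySem.List.pyRange 0 2).foldl (fun fc k =>
        -- 2**(n+N): exponent as (n+N).toNat — exact for 0 ≤ n+N (Python raises inside
        -- range() when n+N < 0 and this loop body is reached; excluded by Pre_)
        (PySem.List.pyRange 0 ((2 : Int) ^ (n + N).toNat)).foldl (fun fc num =>
          -- binNum = bin(num)[2:]
          let binNum0 : List Char := PySem.List.slice (PySem.Int.toBinChars0b num) (some 2) none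
          -- binNum = "0"*((n+N) - len(binNum)) + binNum   ("0"*m is "" for m < 0: .toNat)
          let binNum : List Char :=
            List.replicate ((n + N) - (binNum0.length : Int)).toNat '0' ++ binNum0
          if PySem.Chars.count binNum ['1'] ≠ 1 then
            let localClause : List String :=
              (PySem.List.enumerate binNum).foldl (fun lc jj =>
                let sign := if jj.2 == '0' then "" else "-"
                lc ++ [sign ++ "c_" ++ PySem.Int.toStr i ++ "_" ++ PySem.Int.toStr k ++
                       "_" ++ PySem.Int.toStr jj.1 ++ "_"]) []
            fc ++ [PySem.Str.join "V" localClause]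
          else fc) fc) fc) []
  PySem.Str.join "Λ" finalClause

-- ===== PORT B =====
def requirement2___alt (N : Int) (n : Int) : String :=
  if N ≤ 0 then "" else
  let w := n + N
  let width : Nat := if 0 < w then w.toNat else 1  -- bin() prints at least one digit
  -- staged doubling: patterns of the width, ones-count carried along
  let patterns : List (List Int × Int) :=
    (List.range width).foldl (fun pats _ =>
      ([0, 1] : List Int).flatMap (fun b => pats.map (fun so => (b :: so.1, so.2 + b))))
      [([], 0)]
  let kept : List (List Int) := (patterns.filter (fun so => so.2 ≠ 1)).map (·.1)
  let out : List String :=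
    (PySem.List.pyRange n (n + N)).foldl (fun out i =>
      ([0, 1] : List Int).foldl (fun out k =>
        kept.foldl (fun out s =>
          out ++ [PySem.Str.join "V" ((PySem.List.enumerate s).map (fun jb =>
            (if jb.2 ≠ 0 then "-" else "") ++ "c_" ++ PySem.Int.toStr i ++ "_" ++
              PySem.Int.toStr k ++ "_" ++ PySem.Int.toStr jb.1 ++ "_"))]) out) out) []
  PySem.Str.join "Λ" out

-- ===== PRECONDITION & SPEC =====
-- Pre_ excludes only inputs where Python A raises: for N > 0 and n + N < 0 the body
-- evaluates range(2**(n+N)) on a float and raises TypeError.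
def Pre_requirement2__ (N : Int) (n : Int) : Prop := N ≤ 0 ∨ 0 ≤ n + N
instance (N : Int) (n : Int) : Decidable (Pre_requirement2__ N n) := by
  unfold Pre_requirement2__; infer_instance
def pvWitness_requirement2__ : Int × Int := (1, 0)

def Spec_requirement2__ (N : Int) (n : Int) (out : String) : Prop := out = requirement2___alt N n
instance (N : Int) (n : Int) (out : String) : Decidable (Spec_requirement2__ N n out) := by
  unfold Spec_requirement2__; infer_instance

-- ===== CLAIM (what is proved, stated in full; the proofs are below) =====
def Claim_equal_requirement2__ : Prop := ∀ (N : Int) (n : Int), Dom_requirement2__ N n →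
  Pre_requirement2__ N n → Spec_requirement2__ N n (requirement2__ N n)

-- ===== LEMMAS AND PROOFS =====

-- proof-side closed recursion equal to B's staged-doubling loop
def pvGen : Nat → List (List Int × Int)
  | 0 => [([], 0)]
  | w + 1 =>
    let rest := pvGen w
    ([0, 1] : List Int).flatMap (fun b => rest.map (fun so => (b :: so.1, so.2 + b)))

theorem pv_foldl_gen (W : Nat) :
    (List.range W).foldl (fun pats _ =>
      ([0, 1] : List Int).flatMap (fun b => pats.map (fun so => (b :: so.1, so.2 + b))))
      [([], 0)] = pvGen W := by
  induction W with
  | zero => rfl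
  | succ W ih => rw [List.range_succ, List.foldl_append, ih]; rfl

-- single-character s.count(c) is List.count
theorem pv_count_go_singleton (c : Char) (l : List Char) (fuel acc : Nat)
    (h : l.length ≤ fuel) : PySem.Chars.count.go [c] fuel l acc = acc + l.count c := by
  induction l generalizing fuel acc with
  | nil =>
    cases fuel <;> simp [PySem.Chars.count.go]
  | cons hd tl ih =>
    cases fuel with
    | zero => simp at h
    | succ f =>
      rw [PySem.Chars.count.go]
      simp only [List.isPrefixOf, List.drop, List.length] at *
      by_cases hc : c = hd
      · subst hc
        simp only [BEq.rfl, Bool.true_and, List.isPrefixOf, if_pos]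
        rw [ih f (acc + 1) (by omega)]
        simp [List.count_cons]
        omega
      · have : (c == hd) = false := by simp [hc]
        simp only [this, Bool.false_and, if_neg, Bool.false_eq_true, not_false_iff]
        rw [ih f acc (by omega)]
        have hne : ¬hd = c := fun h => hc h.symm
        simp [List.count_cons, hne]

theorem pv_count_singleton (cs : List Char) (c : Char) :
    PySem.Chars.count cs [c] = cs.count c := by
  unfold PySem.Chars.count
  simp [pv_count_go_singleton c cs cs.length 0 (le_refl _)]

-- the width-w most-significant-bit-first bit string of m
def pvBits (w m : Nat) : List Char :=
  (List.range w).map (fun j => if m >>> (w - 1 - j) &&& 1 ≠ 0 then '1' else '0')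

theorem pvBits_succ (w m : Nat) :
    pvBits (w + 1) m = pvBits w (m / 2) ++ [if m % 2 ≠ 0 then '1' else '0'] := by
  unfold pvBits
  rw [List.range_succ, List.map_append]
  congr 1
  · apply List.map_congr_left
    intro j hj
    have hj' : j < w := List.mem_range.mp hj
    have h1 : w + 1 - 1 - j = (w - 1 - j) + 1 := by omega
    rw [h1, Nat.shiftRight_succ_inside]
  · simp [Nat.and_one_is_mod, Nat.shiftRight_eq_div_pow]

theorem pvBits_zero_val (w : Nat) : pvBits w 0 = List.replicate w '0' := by
  unfold pvBits
  rw [List.eq_replicate_iff]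
  simp

-- A's zero-padded binary char list is the bit string
theorem pv_padded_eq_pvBits (w : Nat) (hw : 0 < w) : ∀ m, m < 2 ^ w →
    List.replicate (w - (Nat.toDigits 2 m).length) '0' ++ Nat.toDigits 2 m = pvBits w m := by
  induction w with
  | zero => omega
  | succ w ih =>
    intro m hm
    rcases Nat.eq_zero_or_pos w with hw0 | hwpos
    · subst hw0
      interval_cases m
      · simp [Nat.toDigits_zero]; decide
      · rw [Nat.toDigits_of_lt_base (by norm_num)]; simp; decide
    · rw [pvBits_succ]
      by_cases h2 : m < 2
      · rw [Nat.toDigits_of_lt_base (by omega)]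
        have hz : m / 2 = 0 := by omega
        rw [hz, pvBits_zero_val]
        simp only [List.length_cons, List.length_nil]
        rw [show w + 1 - 1 = w from by omega]
        interval_cases m <;> simp [Nat.digitChar]
      · rw [Nat.toDigits_of_base_le (by norm_num) (by omega)]
        have hstep : m / 2 < 2 ^ w := by
          have : 2 ^ (w + 1) = 2 * 2 ^ w := by ring
          omega
        rw [← ih hwpos (m / 2) hstep]
        rw [List.length_append]
        simp only [List.length_cons, List.length_nil]
        rw [show (Nat.toDigits 2 (m/2)).length + (0+1) = (Nat.toDigits 2 (m/2)).length + 1 from by omega,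
            show w + 1 - ((Nat.toDigits 2 (m / 2)).length + 1) = w - (Nat.toDigits 2 (m / 2)).length from by omega]
        rw [List.append_assoc]
        congr 2
        rcases Nat.mod_two_eq_zero_or_one m with h | h <;> simp [h, Nat.digitChar]

theorem pv_count_pvBits (w : Nat) : ∀ m, m < 2 ^ w →
    (pvBits w m).count '1' = PySem.Int.bitCount (m : Int) := by
  induction w with
  | zero =>
    intro m hm
    have : m = 0 := by omega
    subst this
    simp [pvBits, PySem.Int.bitCount_zero]
  | succ w ih =>
    intro m hm
    rw [pvBits_succ, List.count_append]
    have hstep : m / 2 < 2 ^ w := by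
      have : 2 ^ (w + 1) = 2 * 2 ^ w := by ring
      omega
    rw [ih (m / 2) hstep]
    rcases Nat.eq_zero_or_pos m with h0 | hpos
    · subst h0
      simp [PySem.Int.bitCount_zero]
    · rw [PySem.Int.bitCount_natCast hpos]
      rcases Nat.mod_two_eq_zero_or_one m with h | h <;> simp [h] <;> omega

-- A's binNum (pad + bin digits) is the width-(max W 1) bit string
theorem pv_binNum (W m : Nat) (hm : m < 2 ^ W) :
    List.replicate (((W : Int) - ((Nat.toDigits 2 m).length : Int)).toNat) '0' ++ Nat.toDigits 2 m
      = pvBits (max W 1) m := by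
  rcases Nat.eq_zero_or_pos W with h0 | hpos
  · subst h0
    have : m = 0 := by omega
    subst this
    decide
  · rw [show max W 1 = W from by omega,
        show (((W : Int) - ((Nat.toDigits 2 m).length : Int)).toNat) = W - (Nat.toDigits 2 m).length from by omega]
    exact pv_padded_eq_pvBits W hpos m hm

-- the two keep/drop tests agree
theorem pv_cond (W m : Nat) (hm : m < 2 ^ W) :
    decide (PySem.Chars.count (pvBits (max W 1) m) ['1'] ≠ 1) = (PySem.Int.bitCount (m : Int) != 1) := by
  have hm' : m < 2 ^ (max W 1) := lt_of_lt_of_le hm (Nat.pow_le_pow_right (by norm_num) (le_max_left _ _))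
  rw [pv_count_singleton, pv_count_pvBits _ m hm']
  by_cases h : PySem.Int.bitCount (m : Int) = 1 <;> simp [h]

-- bin(m)[2:] for m ≥ 0 is the plain binary digit list
theorem pv_slice_bin (m : Nat) :
    PySem.List.slice (PySem.Int.toBinChars0b (m : Int)) (some 2) = Nat.toDigits 2 m := by
  rw [PySem.List.slice_from _ (by norm_num)]
  simp [PySem.Int.toBinChars0b, Int.not_lt.mpr (Int.natCast_nonneg m)]

-- cons decompositions of pvBits
theorem pvBits_cons_lo (W m : Nat) (hm : m < 2 ^ W) :
    pvBits (W + 1) m = '0' :: pvBits W m := by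
  have h0 : m >>> W % 2 = 0 := by
    rw [Nat.shiftRight_eq_div_pow, Nat.div_eq_of_lt hm]
  unfold pvBits
  rw [show W + 1 = 1 + W from by omega, List.range_add, List.map_append, List.map_map,
      List.range_one]
  have hhead : List.map (fun j => if m >>> (1 + W - 1 - j) &&& 1 ≠ 0 then '1' else '0')
      [0] = ['0'] := by
    simp [show 1 + W - 1 - 0 = W from by omega, Nat.and_one_is_mod, h0]
  rw [hhead, List.singleton_append]
  congr 1
  apply List.map_congr_left
  intro j hj
  simp only [Function.comp]
  rw [show 1 + W - 1 - (1 + j) = W - 1 - j from by omega]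

theorem pvBits_cons_hi (W m : Nat) (hm : m < 2 ^ W) :
    pvBits (W + 1) (2 ^ W + m) = '1' :: pvBits W m := by
  have h0 : (2 ^ W + m) >>> W % 2 = 1 := by
    rw [Nat.shiftRight_eq_div_pow, Nat.add_comm, Nat.add_div_right _ (Nat.two_pow_pos _),
        Nat.div_eq_of_lt hm]
  unfold pvBits
  rw [show W + 1 = 1 + W from by omega, List.range_add, List.map_append, List.map_map,
      List.range_one]
  have hhead : List.map (fun j => if (2 ^ W + m) >>> (1 + W - 1 - j) &&& 1 ≠ 0 then '1' else '0')
      [0] = ['1'] := by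
    simp [show 1 + W - 1 - 0 = W from by omega, Nat.and_one_is_mod, h0]
  rw [hhead, List.singleton_append]
  congr 1
  apply List.map_congr_left
  intro j hj
  have hj' : j < W := List.mem_range.mp hj
  simp only [Function.comp]
  rw [show 1 + W - 1 - (1 + j) = W - 1 - j from by omega]
  have hdiv : (2 ^ W + m) >>> (W - 1 - j) = 2 ^ (W - (W - 1 - j)) + m >>> (W - 1 - j) := by
    rw [Nat.shiftRight_eq_div_pow, Nat.shiftRight_eq_div_pow,
        show (2 : Nat) ^ W = 2 ^ (W - 1 - j) * 2 ^ (W - (W - 1 - j)) from by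
          rw [← pow_add]; congr 1; omega,
        Nat.mul_add_div (Nat.two_pow_pos _)]
  have heven : 2 ^ (W - (W - 1 - j)) % 2 = 0 := by
    rw [show W - (W - 1 - j) = (W - (W - 1 - j) - 1) + 1 from by omega, pow_succ]
    omega
  rw [hdiv]
  simp only [Nat.and_one_is_mod]
  rw [show (2 ^ (W - (W - 1 - j)) + m >>> (W - 1 - j)) % 2 = m >>> (W - 1 - j) % 2 from by omega]

-- bitCount additivity at a fresh top bit
theorem pv_bc_add (W : Nat) : ∀ m, m < 2 ^ W →
    PySem.Int.bitCount ((2 ^ W + m : Nat) : Int) = PySem.Int.bitCount (m : Int) + 1 := by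
  induction W with
  | zero =>
    intro m hm
    have : m = 0 := by omega
    subst this
    decide
  | succ W ih =>
    intro m hm
    have hpos : 0 < 2 ^ (W + 1) + m := by positivity
    rw [PySem.Int.bitCount_natCast hpos]
    have hdiv : (2 ^ (W + 1) + m) / 2 = 2 ^ W + m / 2 := by
      have : 2 ^ (W + 1) = 2 ^ W * 2 := by ring
      omega
    have hmod : (2 ^ (W + 1) + m) % 2 = m % 2 := by
      have : 2 ^ (W + 1) = 2 ^ W * 2 := by ring
      omega
    have hstep : m / 2 < 2 ^ W := by
      have : 2 ^ (W + 1) = 2 * 2 ^ W := by ring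
      omega
    rw [hdiv, hmod, ih (m / 2) hstep]
    rcases Nat.eq_zero_or_pos m with h0 | hpos'
    · subst h0
      simp [PySem.Int.bitCount_zero]
    · rw [PySem.Int.bitCount_natCast hpos']
      omega

-- the recursive generator enumerates the bit patterns in ascending numeric order
theorem pv_gen_eq (W : Nat) :
    pvGen W = (List.range (2 ^ W)).map (fun m =>
      ((pvBits W m).map (fun c => if c == '1' then (1 : Int) else 0),
       ((PySem.Int.bitCount (m : Int) : Nat) : Int))) := by
  induction W with
  | zero => decide
  | succ W ih =>
    rw [show pvGen (W + 1) = ((pvGen W).map (fun so => ((0 : Int) :: so.1, so.2 + 0))) ++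
          ((pvGen W).map (fun so => ((1 : Int) :: so.1, so.2 + 1))) from by
        simp [pvGen, List.flatMap_cons]]
    rw [show (2 : Nat) ^ (W + 1) = 2 ^ W + 2 ^ W from by ring, List.range_add,
        List.map_append, List.map_map, ih, List.map_map, List.map_map]
    congr 1
    · apply List.map_congr_left
      intro m hm
      have hm' : m < 2 ^ W := List.mem_range.mp hm
      simp only [Function.comp]
      rw [pvBits_cons_lo W m hm']
      simp
    · apply List.map_congr_left
      intro m hm
      have hm' : m < 2 ^ W := List.mem_range.mp hm
      simp only [Function.comp]
      rw [pvBits_cons_hi W m hm', pv_bc_add W m hm']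
      simp

-- clause formatting: A over the char bits = B over the int bits
theorem pv_clauseB (WD m : Nat) (i k : Int) :
    (PySem.List.enumerate (pvBits WD m)).map (fun jj =>
        (if jj.2 == '0' then "" else "-") ++ "c_" ++ PySem.Int.toStr i ++ "_" ++
          PySem.Int.toStr k ++ "_" ++ PySem.Int.toStr jj.1 ++ "_")
    = (PySem.List.enumerate ((pvBits WD m).map (fun c => if c == '1' then (1 : Int) else 0))).map
        (fun jb => (if jb.2 ≠ 0 then "-" else "") ++ "c_" ++ PySem.Int.toStr i ++ "_" ++
          PySem.Int.toStr k ++ "_" ++ PySem.Int.toStr jb.1 ++ "_") := by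
  apply List.ext_getElem
  · simp [PySem.List.length_enumerate]
  · intro j h1 h2
    have hlen : j < WD := by
      simpa [pvBits, PySem.List.length_enumerate] using h1
    simp only [List.getElem_map, PySem.List.getElem_enumerate, pvBits, List.getElem_range]
    rcases Nat.mod_two_eq_zero_or_one (m >>> (WD - 1 - j)) with h | h <;>
      simp [Nat.and_one_is_mod, h]

-- the filtered enumerations of widths W and max W 1 agree
theorem pv_range_filter (W : Nat) :
    (List.range (2 ^ W)).filter (fun m : Nat => PySem.Int.bitCount (m : Int) != 1)
      = (List.range (2 ^ (max W 1))).filter (fun m : Nat => PySem.Int.bitCount (m : Int) != 1) := by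
  rcases Nat.eq_zero_or_pos W with h0 | hpos
  · subst h0; decide
  · rw [show max W 1 = W from by omega]

-- for one (i, k): A's filtered clause list equals B's pattern-formatting pass
theorem pv_blockB (W : Nat) (i k : Int) :
    List.map
        (fun num =>
          PySem.Str.join "V"
            (List.map
              (fun jj => (if (jj.2 == '0') = true then "" else "-") ++ "c_" ++ PySem.Int.toStr i ++
                  "_" ++ PySem.Int.toStr k ++ "_" ++ PySem.Int.toStr jj.1 ++ "_")
              (PySem.List.enumerate
                (List.replicate ((W : Int) - ↑(PySem.List.slice (PySem.Int.toBinChars0b num) (some 2)).length).toNat '0' ++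
                  PySem.List.slice (PySem.Int.toBinChars0b num) (some 2)))))
        (List.filter
          (fun num => decide (PySem.Chars.count
              (List.replicate ((W : Int) - ↑(PySem.List.slice (PySem.Int.toBinChars0b num) (some 2)).length).toNat '0' ++
                PySem.List.slice (PySem.Int.toBinChars0b num) (some 2)) ['1'] ≠ 1))
          (PySem.List.pyRange 0 ((2 : Int) ^ W)))
    = List.map
        (fun s => PySem.Str.join "V" ((PySem.List.enumerate s).map (fun jb =>
            (if jb.2 ≠ 0 then "-" else "") ++ "c_" ++ PySem.Int.toStr i ++ "_" ++
              PySem.Int.toStr k ++ "_" ++ PySem.Int.toStr jb.1 ++ "_")))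
        (((pvGen (max W 1)).filter (fun so => decide (so.2 ≠ 1))).map (·.1)) := by
  -- B side: unfold the generator into the numeric enumeration
  rw [pv_gen_eq, List.filter_map, List.map_map, List.map_map]
  have hBfil : (List.range (2 ^ (max W 1))).filter
        ((fun so : List Int × Int => decide (so.2 ≠ 1)) ∘ (fun m =>
          ((pvBits (max W 1) m).map (fun c => if c == '1' then (1 : Int) else 0),
           ((PySem.Int.bitCount (m : Int) : Nat) : Int))))
      = (List.range (2 ^ (max W 1))).filter (fun m : Nat => PySem.Int.bitCount (m : Int) != 1) := by
    apply List.filter_congr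
    intro m _
    simp only [Function.comp]
    by_cases h : PySem.Int.bitCount (m : Int) = 1 <;> simp [h]
  rw [hBfil, ← pv_range_filter]
  -- A side: numeric range and char-level condition
  rw [show ((2 : Int) ^ W) = ((2 ^ W : Nat) : Int) from by push_cast; ring,
      PySem.List.pyRange_zero_nat, List.filter_map, List.map_map]
  have hfil : ∀ m ∈ List.range (2 ^ W),
      ((fun num => decide (PySem.Chars.count
          (List.replicate ((W : Int) - ↑(PySem.List.slice (PySem.Int.toBinChars0b num) (some 2)).length).toNat '0' ++
            PySem.List.slice (PySem.Int.toBinChars0b num) (some 2)) ['1'] ≠ 1)) ∘ (fun k : Nat => (k : Int))) m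
      = (fun num : Nat => PySem.Int.bitCount (num : Int) != 1) m := by
    intro m hmem
    have hm : m < 2 ^ W := List.mem_range.mp hmem
    simp only [Function.comp]
    rw [pv_slice_bin, pv_binNum W m hm]
    exact pv_cond W m hm
  rw [List.filter_congr hfil]
  apply List.map_congr_left
  intro m hmem
  have hm : m < 2 ^ W := List.mem_range.mp (List.mem_filter.mp hmem).1
  simp only [Function.comp]
  rw [pv_slice_bin, pv_binNum W m hm]
  exact congrArg (PySem.Str.join "V") (pv_clauseB (max W 1) m i k)

-- ===== VERDICT (by name: the statement is the Claim_ definition above) =====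
theorem requirement2___spec : Claim_equal_requirement2__ := by
  intro N n _ hpre
  unfold Spec_requirement2__ requirement2__ requirement2___alt
  by_cases hN : N ≤ 0
  · rw [if_pos hN, PySem.List.pyRange_one_eq_nil (a := n) (b := n + N) (by omega)]
    rfl
  · rw [if_neg hN]
    have hw : 0 ≤ n + N := by
      rcases hpre with h | h
      · omega
      · exact h
    simp only [PySem.List.foldl_append_singleton_eq_map]
    set W := (n + N).toNat with hWdef
    rw [show (if 0 < n + N then W else 1) = max W 1 from by split <;> omega, pv_foldl_gen]
    simp only [PySem.List.foldl_append_singleton_eq_map, List.nil_append,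
      PySem.List.foldl_append_ite, PySem.List.foldl_append_eq_flatMap,
      List.flatMap_cons, List.flatMap_nil, List.append_nil]
    rw [show n + N = (W : Int) from by omega]
    rw [show PySem.List.pyRange 0 2 = [(0 : Int), 1] from by decide]
    simp only [List.flatMap_cons, List.flatMap_nil, List.append_nil]
    congr 1
    congr 1
    funext i
    congr 1
    · exact pv_blockB W i 0
    · exact pv_blockB W i 1
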